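-- pv_equiv track=rewrite | github.com/Erotemic/aivm | aivm/firewall.py | _normalize_port_list
-- ===== SOURCE A (Python) =====
-- def _normalize_port_list(ports: list[int]) -> list[int]:
--     seen: set[int] = set()
--     out: list[int] = []
--     for raw in ports or []:
--         try:
--             p = int(raw)
--         except Exception as ex:
--             raise RuntimeError(f'Invalid firewall port value: {raw!r}') from ex
--         if p < 1 or p > 65535:
--             raise RuntimeError(
--                 f'Invalid firewall port {p}; expected range 1..65535.'
--             )
--         if p in seen:
--             continue
--         seen.add(p)
--         out.append(p)
--     return out
-- ===== SOURCE B (Python) =====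
-- def _normalize_port_list(ports: list[int]) -> list[int]:
--     def _validate(raw):
--         try:
--             p = int(raw)
--         except Exception as ex:
--             raise RuntimeError(f'Invalid firewall port value: {raw!r}') from ex
--         if p < 1 or p > 65535:
--             raise RuntimeError(
--                 f'Invalid firewall port {p}; expected range 1..65535.'
--             )
--         return p
--
--     vals = [_validate(raw) for raw in (ports or [])]
--     out: list[int] = []
--     while vals:
--         head = vals[0]
--         vals = [v for v in vals[1:] if v != head]
--         out.append(head)
--     return out
-- ===== Notes on version B (the rewrite author's own statement) =====
-- stated objective: alternative
-- what changed: Dedup no longer tracks a seen-set while scanning: B first validates every port in a comprehension, then repeatedly takes the head and filters all its later occurrences out of the remaining list (an erase-successors recursion), so there is no membership test against past elements at all.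
import Mathlib
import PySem

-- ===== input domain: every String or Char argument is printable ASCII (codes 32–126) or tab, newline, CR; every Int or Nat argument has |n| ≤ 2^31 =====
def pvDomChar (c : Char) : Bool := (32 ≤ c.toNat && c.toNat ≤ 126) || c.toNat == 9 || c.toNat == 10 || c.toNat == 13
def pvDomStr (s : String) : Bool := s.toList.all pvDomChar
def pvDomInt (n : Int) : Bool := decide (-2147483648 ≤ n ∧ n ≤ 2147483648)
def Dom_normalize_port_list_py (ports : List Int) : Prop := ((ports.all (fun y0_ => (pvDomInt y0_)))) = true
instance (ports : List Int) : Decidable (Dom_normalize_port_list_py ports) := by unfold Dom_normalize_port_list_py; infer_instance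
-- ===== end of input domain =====

-- B replaces the seen-set scan by validate-then-erase-successors dedup (take head, filter it from the rest); alternative algorithm, same results.
-- ===== PORT A =====
-- A's loop: seen set + out list, skipping already-seen ports; the raise branch (port out of 1..65535) is outside Pre_.
def pvGoA : List Int → PySem.Set Int → List Int → List Int
  | [], _, out => out
  | p :: rest, seen, out =>
    if p < 1 ∨ p > 65535 then out   -- Python raises RuntimeError here; excluded by Pre_
    else if PySem.Set.contains seen p then pvGoA rest seen out
    else pvGoA rest (PySem.Set.add seen p) (out ++ [p])

def normalize_port_list_py (ports : List Int) : List Int :=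
  pvGoA ports PySem.Set.empty []

-- ===== PORT B =====
-- B's validation comprehension (the raise branch is outside Pre_)
def pvValsB : List Int → List Int
  | [] => []
  | p :: rest =>
    if p < 1 ∨ p > 65535 then []   -- Python raises RuntimeError here; excluded by Pre_
    else p :: pvValsB rest

-- B's while loop: take the head, filter it out of the remaining list, repeat.
def pvDedupB : List Int → List Int
  | [] => []
  | p :: rest => p :: pvDedupB (rest.filter (fun v => v ≠ p))
termination_by xs => xs.length
decreasing_by
  simp
  exact le_trans (List.length_filter_le _ _) (le_of_eq List.length_attach)

def normalize_port_list_py_alt (ports : List Int) : List Int :=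
  pvDedupB (pvValsB ports)

-- ===== PRECONDITION & SPEC =====
-- Pre_: exactly the inputs where A returns normally (every port in 1..65535; otherwise A raises RuntimeError).
def Pre_normalize_port_list_py (ports : List Int) : Prop := ∀ p ∈ ports, 1 ≤ p ∧ p ≤ 65535
instance (ports : List Int) : Decidable (Pre_normalize_port_list_py ports) := by unfold Pre_normalize_port_list_py; infer_instance
def pvWitness_normalize_port_list_py : List Int := [80, 443, 80, 22]
def Spec_normalize_port_list_py (ports : List Int) (out : List Int) : Prop := out = normalize_port_list_py_alt ports
instance (ports : List Int) (out : List Int) : Decidable (Spec_normalize_port_list_py ports out) := by unfold Spec_normalize_port_list_py; infer_instance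

-- ===== CLAIM (what is proved, stated in full; the proofs are below) =====
def Claim_equal_normalize_port_list_py : Prop := ∀ (ports : List Int), Dom_normalize_port_list_py ports → Pre_normalize_port_list_py ports → Spec_normalize_port_list_py ports (normalize_port_list_py ports)

-- ===== LEMMAS AND PROOFS =====

-- Unfolding equations for the well-founded pvDedupB.
theorem pvDedupB_nil : pvDedupB [] = [] := by simp [pvDedupB]
theorem pvDedupB_cons (p : Int) (rest : List Int) :
    pvDedupB (p :: rest) = p :: pvDedupB (rest.filter (fun v => v ≠ p)) := by
  rw [pvDedupB.eq_def]

-- Under Pre_, B's validation comprehension is the identity.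
theorem pvValsB_eq (ports : List Int) (h : ∀ p ∈ ports, 1 ≤ p ∧ p ≤ 65535) :
    pvValsB ports = ports := by
  induction ports with
  | nil => rfl
  | cons p rest ih =>
    have hp := h p (by simp)
    rw [pvValsB, if_neg (by omega), ih (fun q hq => h q (List.mem_cons_of_mem _ hq))]

-- Invariant relating A's seen-set loop to B's erase-successors recursion:
-- with seen = out = s, A's loop returns s followed by the dedup of the not-yet-seen ports.
theorem pvGoA_eq (ports : List Int) (h : ∀ p ∈ ports, 1 ≤ p ∧ p ≤ 65535) (s : List Int) :
    pvGoA ports s s = s ++ pvDedupB (ports.filter (fun x => ¬ x ∈ s)) := by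
  induction ports generalizing s with
  | nil => simp [pvGoA, pvDedupB_nil]
  | cons p rest ih =>
    have hp := h p (by simp)
    have hrest : ∀ q ∈ rest, 1 ≤ q ∧ q ≤ 65535 := fun q hq => h q (List.mem_cons_of_mem _ hq)
    rw [pvGoA, if_neg (by omega)]
    have hcm : PySem.Set.contains s p = decide (p ∈ s) := by
      simp [PySem.Set.contains, List.contains_eq_mem]
    by_cases hc : p ∈ s
    · rw [if_pos (by rw [hcm]; simpa using hc), ih hrest, List.filter_cons]
      simp [hc]
    · rw [if_neg (by rw [hcm]; simpa using hc)]
      have hadd : PySem.Set.add s p = s ++ [p] := by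
        unfold PySem.Set.add; rw [hcm, if_neg (by simpa using hc)]
      rw [hadd, ih hrest, List.filter_cons]
      simp only [hc, not_false_iff, decide_true, if_pos]
      rw [pvDedupB_cons, List.append_assoc, List.singleton_append]
      congr 2
      rw [List.filter_filter]
      congr 1
      apply List.filter_congr
      intro x _
      simp [Bool.and_comm]

-- ===== VERDICT (by name: the statement is the Claim_ definition above) =====
theorem normalize_port_list_py_spec : Claim_equal_normalize_port_list_py := by
  intro ports _ hpre
  unfold Spec_normalize_port_list_py normalize_port_list_py normalize_port_list_py_alt
  rw [pvValsB_eq ports hpre]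
  have h := pvGoA_eq ports hpre []
  simpa [PySem.Set.empty] using h
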